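-- pv_equiv track=rewrite | github.com/crmin/sla235-intro-dh | wikis.py | _body_without_title
-- ===== SOURCE A (Python) =====
-- import string
--
-- def _body_without_title(md_body: str) -> str:
--     """Table of Contents title이 존재하지 않는 경우 body 파싱
--
--     Args:
--         md_body (str): page markdown body
--
--     Returns:
--         str: 목차 문자열 (markdown)
--     """
--     body_lines = []
--     toc_start = False  # list의 종료를 확인하기 위한 flag
--     body_start = False  # list가 종료되면 True로 변경되어서 본문임을 확인할 수 있도록 하는 flag
--     for line in md_body.split('\n'):
--         line = line.strip()
--         if len(line) > 0 and line[0] in ('*', '-', '+') + tuple(string.digits):  # list in markdown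
--             # *, -, +: ul / 0, 1, 2, .., 9: ol
--             if not toc_start:
--                 toc_start = True  # list가 시작되면 flag를 True로 변경
--         elif toc_start:  # list가 시작되었는데 지금 읽은 문자열이 list가 아니라면 toc가 종료되었다고 판단
--             body_start = True  # -> 이후부터 본문 내용
--         if not body_start:  # 아직 본문이 아니라면 아무 작업도 수행하지 않고 계속 진행
--             continue
--         if line.startswith('#') and 'reference' in line.lower():  # Reference 시작하면 탈출
--             break
--         if len(line) == 1 and line[0] == '>':  # 인용문인데 내용이 없는 경우 무시하도록 함
--             continue
--         body_lines.append(line)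
--     return '\n'.join(body_lines).strip()
-- ===== SOURCE B (Python) =====
-- def _body_without_title(md_body: str) -> str:
--     """Two-phase rewrite: first locate where the body begins (first non-list
--     line after the first list line), then collect from there."""
--     lines = [l.strip() for l in md_body.split('\n')]
--
--     def is_list(l):
--         return bool(l) and l[0] in '*-+0123456789'
--
--     i = next((k for k, l in enumerate(lines) if is_list(l)), None)
--     if i is None:
--         return ''
--     j = next((k for k in range(i + 1, len(lines)) if not is_list(lines[k])), None)
--     if j is None:
--         return ''
--     out = []
--     for line in lines[j:]:
--         if line.startswith('#') and 'reference' in line.lower():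
--             break
--         if line == '>':
--             continue
--         out.append(line)
--     return '\n'.join(out).strip()
-- ===== Notes on version B (the rewrite author's own statement) =====
-- stated objective: alternative
-- what changed: Replaced the single stateful flag-driven loop (toc_start/body_start booleans threaded through one pass) by a two-phase decomposition: an index search that locates where the body begins (first non-list line after the first list line), then a plain collection loop over the tail.
import Mathlib
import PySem

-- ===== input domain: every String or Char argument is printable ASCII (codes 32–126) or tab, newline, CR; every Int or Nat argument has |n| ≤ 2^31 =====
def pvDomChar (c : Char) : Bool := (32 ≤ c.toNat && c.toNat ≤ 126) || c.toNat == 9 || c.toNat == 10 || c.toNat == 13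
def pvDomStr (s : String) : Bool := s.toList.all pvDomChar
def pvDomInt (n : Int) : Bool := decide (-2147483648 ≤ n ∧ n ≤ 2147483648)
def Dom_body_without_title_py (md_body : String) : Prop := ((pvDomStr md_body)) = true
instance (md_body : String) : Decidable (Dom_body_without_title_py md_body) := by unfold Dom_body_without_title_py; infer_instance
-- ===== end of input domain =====

-- B restructures A's single flag-driven loop into an index search for the body start
-- followed by a plain collection pass; objective: alternative decomposition (same cost).

-- shared char class: '*', '-', '+' and the digits (markdown list markers)
def pvListChars : List Char := ['*', '-', '+', '0', '1', '2', '3', '4', '5', '6', '7', '8', '9']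

-- `len(line) > 0 and line[0] in ('*','-','+')+digits` (both Pythons test this same condition)
def pvIsList (line : String) : Bool :=
  match PySem.Str.pyGet? line 0 with
  | some c => pvListChars.contains c
  | none => false

-- ===== PORT A =====
-- A's for-loop with flags and break, as structural recursion on the remaining lines
def pvALoop (toc body : Bool) (acc : List String) : List String → List String
  | [] => acc
  | raw :: rest =>
    let line := PySem.Str.strip raw
    let isl := pvIsList line
    let toc' := toc || isl
    let body' := body || (!isl && toc)
    if !body' then pvALoop toc' body' acc rest
    else if PySem.Str.startswith line "#" && PySem.Str.isIn "reference" (PySem.Str.lower line) then acc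
    else if PySem.Str.len line == 1 && PySem.Str.pyGet? line 0 == some '>' then pvALoop toc' body' acc rest
    else pvALoop toc' body' (acc ++ [line]) rest

def body_without_title_py (md_body : String) : String :=
  PySem.Str.strip (PySem.Str.join "\n"
    (pvALoop false false [] ((PySem.Str.split? md_body "\n").getD [])))

-- ===== PORT B =====
-- B's collection loop over the tail (break on reference heading, skip bare '>')
def pvCollect : List String → List String
  | [] => []
  | line :: rest =>
    if PySem.Str.startswith line "#" && PySem.Str.isIn "reference" (PySem.Str.lower line) then []
    else if line == ">" then pvCollect rest
    else line :: pvCollect rest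

def body_without_title_py_alt (md_body : String) : String :=
  let lines := ((PySem.Str.split? md_body "\n").getD []).map PySem.Str.strip
  match lines.findIdx? pvIsList with
  | none => ""
  | some i =>
    match (lines.drop (i + 1)).findIdx? (fun l => !pvIsList l) with
    | none => ""
    | some k => PySem.Str.strip (PySem.Str.join "\n" (pvCollect ((lines.drop (i + 1)).drop k)))

-- ===== PRECONDITION & SPEC =====
def Spec_body_without_title_py (md_body : String) (out : String) : Prop := out = body_without_title_py_alt md_body
instance (md_body : String) (out : String) : Decidable (Spec_body_without_title_py md_body out) := by unfold Spec_body_without_title_py; infer_instance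

-- ===== CLAIM (what is proved, stated in full; the proofs are below) =====
def Claim_equal_body_without_title_py : Prop := ∀ (md_body : String), Dom_body_without_title_py md_body → Spec_body_without_title_py md_body (body_without_title_py md_body)

-- ===== LEMMAS AND PROOFS =====

-- proof-only: A's loop over lines already stripped
def pvALoopS (toc body : Bool) (acc : List String) : List String → List String
  | [] => acc
  | line :: rest =>
    let isl := pvIsList line
    let toc' := toc || isl
    let body' := body || (!isl && toc)
    if !body' then pvALoopS toc' body' acc rest
    else if PySem.Str.startswith line "#" && PySem.Str.isIn "reference" (PySem.Str.lower line) then acc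
    else if PySem.Str.len line == 1 && PySem.Str.pyGet? line 0 == some '>' then pvALoopS toc' body' acc rest
    else pvALoopS toc' body' (acc ++ [line]) rest

-- the `len(line)==1 and line[0]=='>'` test of A is the `line == '>'` test of B
lemma pvGtEq (l : String) :
    (PySem.Str.len l == 1 && PySem.Str.pyGet? l 0 == some '>') = (l == ">") := by
  rw [Bool.eq_iff_iff]
  simp only [Bool.and_eq_true, beq_iff_eq, ← String.toList_inj]
  rw [show (">" : String).toList = ['>'] from rfl]
  simp only [PySem.Str.len_eq]
  rw [show (0 : Int) = ((0 : Nat) : Int) from rfl, PySem.Str.pyGet?_natCast]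
  cases h : l.toList with
  | nil => simp
  | cons c cs => cases cs <;> simp <;> (intro hx hc; omega)

-- strip commutes out of the loop: A strips inside, B strips up front
lemma pvALoop_map_strip (ls : List String) : ∀ (t b : Bool) (acc : List String),
    pvALoop t b acc ls = pvALoopS t b acc (ls.map PySem.Str.strip) := by
  induction ls with
  | nil => intro t b acc; rfl
  | cons raw rest ih =>
    intro t b acc
    simp only [pvALoop, pvALoopS, List.map_cons]
    split_ifs <;> simp [ih]

-- once the body has started, A's loop is acc ++ B's collection pass
lemma pvALoopS_body (ls : List String) : ∀ (t : Bool) (acc : List String),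
    pvALoopS t true acc ls = acc ++ pvCollect ls := by
  induction ls with
  | nil => intro t acc; simp [pvALoopS, pvCollect]
  | cons l rest ih =>
    intro t acc
    simp only [pvALoopS, pvCollect, pvGtEq, Bool.true_or, Bool.not_true, Bool.false_eq_true,
      if_false]
    split_ifs <;> simp [ih]

-- while toc has started and the body has not: skip list lines until the first non-list line
lemma pvALoopS_toc (ls : List String) : ∀ (acc : List String),
    pvALoopS true false acc ls =
      match ls.findIdx? (fun l => !pvIsList l) with
      | none => acc
      | some j => acc ++ pvCollect (ls.drop j) := by
  induction ls with
  | nil => intro acc; rfl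
  | cons l rest ih =>
    intro acc
    by_cases h : pvIsList l = true
    · simp only [pvALoopS, h, List.findIdx?_cons, Bool.or_false, Bool.not_true, Bool.and_false,
        Bool.false_and, Bool.or_true, Bool.not_false, Bool.false_or, Bool.true_and, cond_false]
      rw [ih]
      cases hf : rest.findIdx? (fun l => !pvIsList l) <;> simp [hf, h]
    · have h' : pvIsList l = false := by simpa using h
      simp only [pvALoopS, h', List.findIdx?_cons, Bool.or_false, Bool.not_true, Bool.and_false,
        Bool.false_and, Bool.or_true, Bool.not_false, Bool.false_or, Bool.true_and, cond_true]
      simp only [pvCollect, pvGtEq, List.drop_zero]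
      split_ifs <;> simp_all [pvALoopS_body, pvCollect]

-- before any list line: skip until the first list line
lemma pvALoopS_start (ls : List String) : ∀ (acc : List String),
    pvALoopS false false acc ls =
      match ls.findIdx? pvIsList with
      | none => acc
      | some i => pvALoopS true false acc (ls.drop (i + 1)) := by
  induction ls with
  | nil => intro acc; rfl
  | cons l rest ih =>
    intro acc
    by_cases h : pvIsList l = true
    · simp [pvALoopS, h, List.findIdx?_cons]
    · have h' : pvIsList l = false := by simpa using h
      simp only [pvALoopS, h', List.findIdx?_cons, Bool.or_false, Bool.not_false, Bool.and_false,
        Bool.false_and, Bool.false_or, Bool.or_self, Bool.not_true, cond_false]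
      rw [ih]
      cases hf : rest.findIdx? pvIsList <;> simp [hf, h']

-- the whole pipeline, over an arbitrary list of (stripped) lines
lemma pvMain (ls : List String) :
    PySem.Str.strip (PySem.Str.join "\n" (pvALoopS false false [] ls)) =
      (match ls.findIdx? pvIsList with
       | none => ""
       | some i =>
         match (ls.drop (i + 1)).findIdx? (fun l => !pvIsList l) with
         | none => ""
         | some k => PySem.Str.strip (PySem.Str.join "\n" (pvCollect ((ls.drop (i + 1)).drop k)))) := by
  rw [pvALoopS_start]
  cases h1 : ls.findIdx? pvIsList with
  | none => simp only; decide
  | some i =>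
    simp only
    rw [pvALoopS_toc]
    cases h2 : (ls.drop (i + 1)).findIdx? (fun l => !pvIsList l) with
    | none => simp only; decide
    | some k => simp

-- ===== VERDICT (by name: the statement is the Claim_ definition above) =====
theorem body_without_title_py_spec : Claim_equal_body_without_title_py := by
  intro md _
  show body_without_title_py md = body_without_title_py_alt md
  unfold body_without_title_py body_without_title_py_alt
  rw [pvALoop_map_strip]
  exact pvMain _
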